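-- pv_equiv track=rewrite | github.com/abalon1210/CAMP---Context-Aware-Mining-Patterns-for-Interaction-Failures | cafca_colab.py | Frequent2ElementSequenceExtractor
-- ===== SOURCE A (Python) =====
-- def FrequentElementExtractor(vIdList, sup_threshold): # filter out sequence atoms based on the support threshold
--   frequentEleSet = {} # key: sequence atom, value: list of (seqid, time)
--   for key, value in vIdList.items():
--     s=set()
--     for v in value: # count how many sequences has the sequence atom
--       s.add(v[0])
--     if len(s) >= sup_threshold:
--       frequentEleSet[key] = value
--   return frequentEleSet
--
-- def TemporalJoin(element_a, element_b): # temporal join two sequence atoms' id lists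
--   resultList = {} # key: new sequence atom (combining element_a & element_b), value: list of (seqid, time)
--
--   for event_a in element_a[1]:
--     for event_b in element_b[1]:
--       if event_a[0] == event_b[0]: # seqid
--         if event_a[1] < event_b[1]: # time
--           newSeq = tuple(element_a[0]+[element_b[0][-1]])
--           if newSeq not in resultList:
--             resultList[newSeq] = set()
--           resultList[newSeq].add(event_b)
--         elif event_a[1] > event_b[1]: # time
--           newSeq = tuple(element_b[0]+[element_a[0][-1]])
--           if newSeq not in resultList:
--             resultList[newSeq] = set()
--           resultList[newSeq].add(event_a)
--         elif element_a[0][-1] != element_b[0][-1]: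
--           newSeq_1 = tuple(element_a[0][:-1] + sorted([element_a[0][-1],element_b[0][-1]]))
--           if newSeq_1 not in resultList:
--             resultList[newSeq_1] = set()
--           resultList[newSeq_1].add(event_b)
--           newSeq_2 = tuple(element_b[0][:-1] + sorted([element_a[0][-1],element_b[0][-1]]))
--           if newSeq_1 != newSeq_2:
--             if newSeq_2 not in resultList:
--               resultList[newSeq_2] = set()
--             resultList[newSeq_2].add(event_b)
--   return resultList
--
-- def Frequent2ElementSequenceExtractor(freqEleList, sup_threshold): # extract all the frequent 2-sequences
--   # build a horizontal database from vertical id list of elements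
--   horizontalDB = {} # key: seqid, value: list of (element, time)
--   for e, idlist in freqEleList.items():
--     for ids in idlist:
--       if ids[0] not in horizontalDB:
--         horizontalDB[ids[0]] = []
--       horizontalDB[ids[0]].append([e, ids[1]])
--
--   # construct all the 2-sequence in the database, and count the number of 2-sequence
--   count2EleSeq = {} # key: 2-sequence, value: number of the 2-sequence
--   for sid, sequence in horizontalDB.items():
--     for index_a, event_a in enumerate(sequence):
--       for index_b, event_b in enumerate(sequence[index_a+1:]):
--         # compare the time of two events, and construct 2-sequence
--         if event_a[1] <= event_b[1]:
--           twoEleSeq = (event_a[0], event_b[0])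
--         else:
--           twoEleSeq = (event_b[0], event_a[0])
--         # count the number of 2-sequence
--         if twoEleSeq not in count2EleSeq:
--           count2EleSeq[twoEleSeq] = 0
--         count2EleSeq[twoEleSeq] += 1
--
--   # based on elements of 2-sequence, temporal join two id lists to get the 2-sequence's id lists
--   newSeqEleIdList = {} # key: 2-sequence, value: set of (seqid, time)
--   for twoSeq, count in count2EleSeq.items():
--     if count < sup_threshold:
--       continue
--     if twoSeq[0] == twoSeq[1]:
--       continue
--     joinedIdList = TemporalJoin([[twoSeq[0]], freqEleList[twoSeq[0]]], [[twoSeq[1]], freqEleList[twoSeq[1]]])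
--     for seq, idlist in joinedIdList.items():
--       if seq not in newSeqEleIdList:
--         newSeqEleIdList[seq] = set()
--       newSeqEleIdList[seq].update(idlist)
--
--   return FrequentElementExtractor(newSeqEleIdList, sup_threshold)
-- ===== SOURCE B (Python) =====
-- def Frequent2ElementSequenceExtractor(freqEleList, sup_threshold):
--     # horizontal database: seqid -> list of [element, time], in encounter order
--     horizontalDB = {}
--     for e, idlist in freqEleList.items():
--         for sid, t in idlist:
--             horizontalDB.setdefault(sid, []).append([e, t])
--
--     # count occurrences of each 2-sequence
--     count2EleSeq = {}
--     for sequence in horizontalDB.values():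
--         for i, (ea, ta) in enumerate(sequence):
--             for eb, tb in sequence[i + 1:]:
--                 key = (ea, eb) if ta <= tb else (eb, ea)
--                 count2EleSeq[key] = count2EleSeq.get(key, 0) + 1
--
--     # hash join per frequent candidate pair, accumulating the id lists directly
--     merged = {}
--     for (x, y), count in count2EleSeq.items():
--         if count < sup_threshold or x == y:
--             continue
--         buckets = {}  # seqid -> y's events with that seqid, in order
--         for eb in freqEleList[y]:
--             buckets.setdefault(eb[0], []).append(eb)
--         asc, desc, tie = (x, y), (y, x), (min(x, y), max(x, y))
--         for ea in freqEleList[x]: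
--             for eb in buckets.get(ea[0], []):
--                 if ea[1] < eb[1]:
--                     merged.setdefault(asc, set()).add(tuple(eb))
--                 elif ea[1] > eb[1]:
--                     merged.setdefault(desc, set()).add(tuple(ea))
--                 else:
--                     merged.setdefault(tie, set()).add(tuple(eb))
--
--     # keep 2-sequences supported by enough distinct sequences
--     return {seq: ids for seq, ids in merged.items()
--             if len({sid for sid, _ in ids}) >= sup_threshold}
-- ===== Notes on version B (the rewrite author's own statement) =====
-- stated objective: alternative
-- what changed: B replaces A's nested-loop temporal join (every event of one id list against every event of the other) by a hash join that buckets the second id list by seqid and joins only within matching buckets, specialises the join keys to 2-sequences, and accumulates joined id lists directly into one dictionary instead of building and merging a per-pair dictionary.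
import Mathlib
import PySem

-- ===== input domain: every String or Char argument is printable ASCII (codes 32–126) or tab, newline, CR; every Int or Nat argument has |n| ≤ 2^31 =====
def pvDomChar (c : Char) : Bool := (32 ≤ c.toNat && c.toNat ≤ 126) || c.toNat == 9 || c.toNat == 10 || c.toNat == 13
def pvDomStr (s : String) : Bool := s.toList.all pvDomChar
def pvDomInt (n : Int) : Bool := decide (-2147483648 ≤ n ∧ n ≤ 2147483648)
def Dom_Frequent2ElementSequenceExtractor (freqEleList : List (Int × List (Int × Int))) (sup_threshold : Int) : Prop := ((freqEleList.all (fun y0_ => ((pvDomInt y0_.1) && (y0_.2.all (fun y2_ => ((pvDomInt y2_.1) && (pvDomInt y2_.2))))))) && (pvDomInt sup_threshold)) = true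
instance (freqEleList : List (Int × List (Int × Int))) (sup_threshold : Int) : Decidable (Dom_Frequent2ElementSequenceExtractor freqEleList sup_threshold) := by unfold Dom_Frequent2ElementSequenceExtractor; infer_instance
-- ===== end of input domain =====

-- B replaces A's nested-loop temporal join by a hash join (bucket the second id list by seqid,
-- join only within matching buckets) with the per-pair keys specialised to 2-sequences, and
-- accumulates the joined id lists directly instead of building and merging a per-pair
-- dictionary; objective: alternative (the shared pair-counting stage dominates the runtime).

-- shared helper: Python dict lookup freqEleList[k] (first match; the key is always present where A/B call it)
def pvFind (d : List (Int × List (Int × Int))) (k : Int) : List (Int × Int) :=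
  (PySem.Dict.mk d).getD k []

-- ===== PORT A =====
-- helper FrequentElementExtractor (literal port)
def pvFreqEleExtract (vIdList : PySem.Dict (List Int) (PySem.Set (Int × Int))) (sup_threshold : Int) :
    PySem.Dict (List Int) (PySem.Set (Int × Int)) :=
  vIdList.items.foldl (fun freq kv =>
    let s : PySem.Set Int := kv.2.foldl (fun s v => s.add v.1) PySem.Set.empty
    if sup_threshold ≤ (s.length : Int) then freq.insert kv.1 kv.2 else freq) PySem.Dict.empty

-- helper TemporalJoin (literal port; element prefixes are nonempty wherever A calls it, so the
-- total pyGetD with default 0 for element_x[0][-1] is exact on every reachable call)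
def pvTemporalJoin (ea_ eb_ : List Int × List (Int × Int)) :
    PySem.Dict (List Int) (PySem.Set (Int × Int)) :=
  ea_.2.foldl (fun res ev_a =>
    eb_.2.foldl (fun res ev_b =>
      if ev_a.1 == ev_b.1 then
        if ev_a.2 < ev_b.2 then
          let newSeq := ea_.1 ++ [PySem.List.pyGetD eb_.1 (-1) 0]
          let res := if res.contains newSeq then res else res.insert newSeq PySem.Set.empty
          res.modify newSeq PySem.Set.empty (fun s => s.add ev_b)
        else if ev_a.2 > ev_b.2 then
          let newSeq := eb_.1 ++ [PySem.List.pyGetD ea_.1 (-1) 0]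
          let res := if res.contains newSeq then res else res.insert newSeq PySem.Set.empty
          res.modify newSeq PySem.Set.empty (fun s => s.add ev_a)
        else if PySem.List.pyGetD ea_.1 (-1) 0 ≠ PySem.List.pyGetD eb_.1 (-1) 0 then
          let newSeq1 := PySem.List.slice ea_.1 none (some (-1)) ++
            PySem.List.sorted [PySem.List.pyGetD ea_.1 (-1) 0, PySem.List.pyGetD eb_.1 (-1) 0] (fun z => z) false
          let res := if res.contains newSeq1 then res else res.insert newSeq1 PySem.Set.empty
          let res := res.modify newSeq1 PySem.Set.empty (fun s => s.add ev_b)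
          let newSeq2 := PySem.List.slice eb_.1 none (some (-1)) ++
            PySem.List.sorted [PySem.List.pyGetD ea_.1 (-1) 0, PySem.List.pyGetD eb_.1 (-1) 0] (fun z => z) false
          if newSeq1 ≠ newSeq2 then
            let res := if res.contains newSeq2 then res else res.insert newSeq2 PySem.Set.empty
            res.modify newSeq2 PySem.Set.empty (fun s => s.add ev_b)
          else res
        else res
      else res) res) PySem.Dict.empty

def Frequent2ElementSequenceExtractor (freqEleList : List (Int × List (Int × Int))) (sup_threshold : Int) :
    List (List Int × List (Int × Int)) :=
  let horizontalDB : PySem.Dict Int (List (Int × Int)) :=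
    freqEleList.foldl (fun db kv =>
      kv.2.foldl (fun db ids =>
        let db := if db.contains ids.1 then db else db.insert ids.1 []
        db.modify ids.1 [] (fun l => l ++ [(kv.1, ids.2)])) db) PySem.Dict.empty
  let count2EleSeq : PySem.Dict (Int × Int) Int :=
    horizontalDB.items.foldl (fun cnt sq =>
      (PySem.List.enumerate sq.2).foldl (fun cnt ia =>
        (PySem.List.slice sq.2 (some (ia.1 + 1)) none).foldl (fun cnt ev_b =>
          let two := if ia.2.2 ≤ ev_b.2 then (ia.2.1, ev_b.1) else (ev_b.1, ia.2.1)
          let cnt := if cnt.contains two then cnt else cnt.insert two 0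
          cnt.modify two 0 (fun c => c + 1)) cnt) cnt) PySem.Dict.empty
  let newSeqEleIdList : PySem.Dict (List Int) (PySem.Set (Int × Int)) :=
    count2EleSeq.items.foldl (fun acc tc =>
      if tc.2 < sup_threshold then acc
      else if tc.1.1 == tc.1.2 then acc
      else
        let joined := pvTemporalJoin ([tc.1.1], pvFind freqEleList tc.1.1)
                                     ([tc.1.2], pvFind freqEleList tc.1.2)
        joined.items.foldl (fun acc si =>
          let acc := if acc.contains si.1 then acc else acc.insert si.1 PySem.Set.empty
          acc.modify si.1 PySem.Set.empty (fun s => s.update si.2)) acc) PySem.Dict.empty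
  (pvFreqEleExtract newSeqEleIdList sup_threshold).items

-- ===== PORT B =====
def Frequent2ElementSequenceExtractor_alt (freqEleList : List (Int × List (Int × Int))) (sup_threshold : Int) :
    List (List Int × List (Int × Int)) :=
  let horizontalDB : PySem.Dict Int (List (Int × Int)) :=
    freqEleList.foldl (fun db kv =>
      kv.2.foldl (fun db ids =>
        db.insert ids.1 (db.getD ids.1 [] ++ [(kv.1, ids.2)])) db) PySem.Dict.empty
  let count2EleSeq : PySem.Dict (Int × Int) Int :=
    horizontalDB.values.foldl (fun cnt sq =>
      (PySem.List.enumerate sq).foldl (fun cnt ia =>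
        (PySem.List.slice sq (some (ia.1 + 1)) none).foldl (fun cnt ev_b =>
          let key := if ia.2.2 ≤ ev_b.2 then (ia.2.1, ev_b.1) else (ev_b.1, ia.2.1)
          cnt.insert key (cnt.getD key 0 + 1)) cnt) cnt) PySem.Dict.empty
  let merged : PySem.Dict (List Int) (PySem.Set (Int × Int)) :=
    count2EleSeq.items.foldl (fun acc tc =>
      if tc.2 < sup_threshold || tc.1.1 == tc.1.2 then acc
      else
        let buckets : PySem.Dict Int (List (Int × Int)) :=
          (pvFind freqEleList tc.1.2).foldl (fun d eb =>
            d.insert eb.1 (d.getD eb.1 [] ++ [eb])) PySem.Dict.empty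
        let asc := [tc.1.1, tc.1.2]
        let desc := [tc.1.2, tc.1.1]
        let tie := [min tc.1.1 tc.1.2, max tc.1.1 tc.1.2]
        (pvFind freqEleList tc.1.1).foldl (fun acc ev_a =>
          (buckets.getD ev_a.1 []).foldl (fun acc ev_b =>
            if ev_a.2 < ev_b.2 then acc.insert asc ((acc.getD asc PySem.Set.empty).add ev_b)
            else if ev_a.2 > ev_b.2 then acc.insert desc ((acc.getD desc PySem.Set.empty).add ev_a)
            else acc.insert tie ((acc.getD tie PySem.Set.empty).add ev_b)) acc) acc) PySem.Dict.empty
  (merged.items.foldl (fun out kv =>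
    if sup_threshold ≤ ((PySem.Set.ofList (kv.2.map (fun v => v.1))).length : Int)
    then out.insert kv.1 kv.2 else out) PySem.Dict.empty).items

-- ===== PRECONDITION & SPEC =====
def Spec_Frequent2ElementSequenceExtractor (freqEleList : List (Int × List (Int × Int))) (sup_threshold : Int) (out : List (List Int × List (Int × Int))) : Prop := out = Frequent2ElementSequenceExtractor_alt freqEleList sup_threshold
instance (freqEleList : List (Int × List (Int × Int))) (sup_threshold : Int) (out : List (List Int × List (Int × Int))) : Decidable (Spec_Frequent2ElementSequenceExtractor freqEleList sup_threshold out) := by unfold Spec_Frequent2ElementSequenceExtractor; infer_instance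

-- ===== CLAIM (what is proved, stated in full; the proofs are below) =====
def Claim_equal_Frequent2ElementSequenceExtractor : Prop := ∀ (freqEleList : List (Int × List (Int × Int))) (sup_threshold : Int), Dom_Frequent2ElementSequenceExtractor freqEleList sup_threshold → Spec_Frequent2ElementSequenceExtractor freqEleList sup_threshold (Frequent2ElementSequenceExtractor freqEleList sup_threshold)

-- ===== LEMMAS AND PROOFS =====

-- proof-only helpers: the per-matching-pair "add value v under key k" step, the normalized
-- merge step of A, the key/value selector of a 2-sequence join, and the joined pair list
def pvAddTo (G : PySem.Dict (List Int) (PySem.Set (Int × Int))) (p : List Int × (Int × Int)) :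
    PySem.Dict (List Int) (PySem.Set (Int × Int)) :=
  G.insert p.1 ((G.getD p.1 PySem.Set.empty).add p.2)

def pvMStep (G : PySem.Dict (List Int) (PySem.Set (Int × Int))) (si : List Int × PySem.Set (Int × Int)) :
    PySem.Dict (List Int) (PySem.Set (Int × Int)) :=
  G.insert si.1 ((G.getD si.1 PySem.Set.empty).update si.2)

def pvSel (x y : Int) (p : (Int × Int) × (Int × Int)) : List Int × (Int × Int) :=
  if p.1.2 < p.2.2 then ([x, y], p.2)
  else if p.2.2 < p.1.2 then ([y, x], p.1)
  else ([min x y, max x y], p.2)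

def pvOpsKV (x y : Int) (xs ys : List (Int × Int)) : List (List Int × (Int × Int)) :=
  xs.flatMap (fun ea => (ys.filter (fun eb => eb.1 == ea.1)).map (fun eb => pvSel x y (ea, eb)))

-- Python "if k not in d: d[k] = v0" followed by "d[k] op= …" is one overwriting insert
theorem pv_dict_step {κ ν : Type} [BEq κ] [LawfulBEq κ] (d : PySem.Dict κ ν) (k : κ) (v0 : ν) (f : ν → ν) :
    PySem.Dict.modify (if d.contains k then d else d.insert k v0) k v0 f = d.insert k (f (d.getD k v0)) := by
  cases h : d.contains k
  · simp [PySem.Dict.modify, PySem.Dict.getD_insert_self, PySem.Dict.insert_insert_self,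
      PySem.Dict.getD_of_not_contains _ _ h]
  · simp [PySem.Dict.modify]

theorem pv_beq_comm (a b : Int) : (a == b) = (b == a) := by
  by_cases h : a = b
  · simp [h]
  · have h2 : b ≠ a := fun hh => h hh.symm
    simp [h, h2]

theorem pv_sorted_pair (x y : Int) :
    PySem.List.sorted [x, y] (fun z => z) false = [min x y, max x y] := by
  rcases le_or_gt x y with h | h
  · simp [PySem.List.sorted, PySem.List.insertBy, h, not_lt.mpr h]
  · simp [PySem.List.sorted, PySem.List.insertBy, h, le_of_lt h]

theorem pv_set_fold_fst (l : List (Int × Int)) :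
    l.foldl (fun (s : PySem.Set Int) v => s.add v.1) PySem.Set.empty = PySem.Set.ofList (l.map (fun v => v.1)) := by
  rw [← PySem.Set.update_map_eq_foldl_add, PySem.Set.update_empty]

theorem pv_bucket_getD (ys : List (Int × Int)) (c : Int) :
    (ys.foldl (fun (d : PySem.Dict Int (List (Int × Int))) eb =>
        d.insert eb.1 (d.getD eb.1 [] ++ [eb])) PySem.Dict.empty).getD c []
      = ys.filter (fun eb => eb.1 == c) := by
  have h1 : ys.foldl (fun (d : PySem.Dict Int (List (Int × Int))) eb =>
        d.insert eb.1 (d.getD eb.1 [] ++ [eb])) PySem.Dict.empty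
      = (ys.map (fun eb => (eb.1, eb))).foldl
          (fun d p => d.modify p.1 [] (fun l => l ++ [p.2])) PySem.Dict.empty := by
    rw [List.foldl_map]; rfl
  rw [h1, PySem.Dict.getD_foldl_modify_append]
  simp [List.filter_map, List.map_map, Function.comp_def]

theorem pv_insert_comm {κ ν : Type} [BEq κ] [LawfulBEq κ] (H : PySem.Dict κ ν) (k k' : κ) (w w' : ν)
    (hk : H.contains k = true) (hne : k' ≠ k) :
    (H.insert k w).insert k' w' = (H.insert k' w').insert k w := by
  apply PySem.Dict.ext
  have hki : (H.insert k w).contains k' = H.contains k' := by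
    rw [PySem.Dict.contains_insert]; simp [hne]
  have hk'i : (H.insert k' w').contains k = true := by
    rw [PySem.Dict.contains_insert]; simp [hk]
  by_cases hc : H.contains k' = true
  · rw [PySem.Dict.items_insert_of_contains _ _ (by rw [hki]; exact hc),
        PySem.Dict.items_insert_of_contains _ _ hk,
        PySem.Dict.items_insert_of_contains _ _ hk'i,
        PySem.Dict.items_insert_of_contains _ _ hc,
        List.map_map, List.map_map]
    apply List.map_congr_left
    intro p _
    by_cases h1 : p.1 = k <;> by_cases h2 : p.1 = k' <;>
      simp [Function.comp, h1, h2, hne, Ne.symm hne]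
  · have hc2 : (H.insert k w).contains k' = false := by rw [hki]; exact (by simpa using hc)
    rw [PySem.Dict.items_insert_of_not_contains _ _ hc2,
        PySem.Dict.items_insert_of_contains _ _ hk,
        PySem.Dict.items_insert_of_contains _ _ hk'i,
        PySem.Dict.items_insert_of_not_contains _ _ (by simpa using hc),
        List.map_append]
    simp [hne]

theorem pv_foldl_mstep_insert (L : List (List Int × PySem.Set (Int × Int)))
    (H : PySem.Dict (List Int) (PySem.Set (Int × Int))) (k : List Int) (w : PySem.Set (Int × Int))
    (hk : H.contains k = true) (hL : ∀ q ∈ L, q.1 ≠ k) :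
    L.foldl pvMStep (H.insert k w) = (L.foldl pvMStep H).insert k w := by
  induction L generalizing H with
  | nil => rfl
  | cons q L ih =>
    have hq : q.1 ≠ k := hL q (List.mem_cons_self)
    have h1 : pvMStep (H.insert k w) q = (pvMStep H q).insert k w := by
      unfold pvMStep
      rw [PySem.Dict.getD_insert_of_ne _ _ _ hq, pv_insert_comm H k q.1 w _ hk hq]
    rw [List.foldl_cons, List.foldl_cons, h1,
      ih (pvMStep H q) (by unfold pvMStep; rw [PySem.Dict.contains_insert]; simp [hk])
        (fun q' hq' => hL q' (List.mem_cons_of_mem _ hq'))]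

theorem pv_getD_foldl_mstep (L : List (List Int × PySem.Set (Int × Int)))
    (H : PySem.Dict (List Int) (PySem.Set (Int × Int))) (k : List Int)
    (hL : ∀ q ∈ L, q.1 ≠ k) :
    (L.foldl pvMStep H).getD k PySem.Set.empty = H.getD k PySem.Set.empty := by
  induction L generalizing H with
  | nil => rfl
  | cons q L ih =>
    rw [List.foldl_cons, ih _ (fun q' hq' => hL q' (List.mem_cons_of_mem _ hq'))]
    unfold pvMStep
    rw [PySem.Dict.getD_insert_of_ne _ _ _ (Ne.symm (hL q List.mem_cons_self))]

theorem pv_update_add (s s0 : PySem.Set (Int × Int)) (v : Int × Int) :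
    s.update (s0.add v) = (s.update s0).add v := by
  by_cases h : v ∈ s0
  · rw [PySem.Set.add_of_mem h, PySem.Set.add_of_mem ((PySem.Set.mem_update s s0 v).mpr (Or.inr h))]
  · rw [PySem.Set.add_of_not_mem h, PySem.Set.update_append]
    rfl

theorem pv_merge_addTo (J G : PySem.Dict (List Int) (PySem.Set (Int × Int)))
    (hJ : J.keys.Nodup) (p : List Int × (Int × Int)) :
    (pvAddTo J p).items.foldl pvMStep G = pvAddTo (J.items.foldl pvMStep G) p := by
  by_cases hc : J.contains p.1 = true
  · -- key already present: items are updated in place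
    obtain ⟨v0, hv0⟩ : ∃ v0, (p.1, v0) ∈ J.items := by
      have := (PySem.Dict.contains_iff_mem_keys J p.1).mp hc
      simp only [PySem.Dict.keys, List.mem_map] at this
      obtain ⟨q, hq, hq1⟩ := this
      exact ⟨q.2, by rwa [← hq1, Prod.mk.eta]⟩
    have hgd : J.getD p.1 PySem.Set.empty = v0 := PySem.Dict.getD_of_mem_items J hv0 hJ _
    obtain ⟨L1, L2, hitems⟩ := List.append_of_mem hv0
    have hkeys : (L1.map Prod.fst ++ p.1 :: L2.map Prod.fst).Nodup := by
      have := hJ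
      simp only [PySem.Dict.keys, hitems, List.map_append, List.map_cons] at this
      exact this
    have hL1 : ∀ q ∈ L1, q.1 ≠ p.1 := by
      intro q hq h
      exact (List.nodup_append.mp hkeys).2.2 q.1 (List.mem_map_of_mem hq) p.1 List.mem_cons_self h
    have hL2 : ∀ q ∈ L2, q.1 ≠ p.1 := by
      intro q hq h
      have := (List.nodup_append.mp hkeys).2.1
      rw [List.nodup_cons] at this
      exact this.1 (by rw [← h]; exact List.mem_map_of_mem hq)
    have hinsitems : ∀ (w : PySem.Set (Int × Int)),
        (J.insert p.1 w).items = L1 ++ (p.1, w) :: L2 := by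
      intro w
      rw [PySem.Dict.items_insert_of_contains _ _ hc, hitems, List.map_append, List.map_cons]
      simp only [beq_self_eq_true, if_pos]
      congr 1
      · conv_rhs => rw [← List.map_id L1]
        exact List.map_congr_left (fun q hq => by simp [hL1 q hq])
      · congr 1
        conv_rhs => rw [← List.map_id L2]
        exact List.map_congr_left (fun q hq => by simp [hL2 q hq])
    have hAdd : pvAddTo J p = J.insert p.1 (v0.add p.2) := by
      unfold pvAddTo; rw [hgd]
    rw [hAdd, hinsitems]
    -- fold the decomposed list on the left side
    set G1 := L1.foldl pvMStep G with hG1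
    set w0 := (G1.getD p.1 PySem.Set.empty).update v0 with hw0
    have hstep : pvMStep G1 (p.1, v0.add p.2) = (G1.insert p.1 w0).insert p.1 (w0.add p.2) := by
      unfold pvMStep
      rw [PySem.Dict.insert_insert_self]
      simp only []
      rw [pv_update_add, ← hw0]
    have hcont : (G1.insert p.1 w0).contains p.1 = true := by
      rw [PySem.Dict.contains_insert]; simp
    calc (L1 ++ (p.1, v0.add p.2) :: L2).foldl pvMStep G
        = L2.foldl pvMStep (pvMStep G1 (p.1, v0.add p.2)) := by
          rw [List.foldl_append, List.foldl_cons]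
      _ = L2.foldl pvMStep ((G1.insert p.1 w0).insert p.1 (w0.add p.2)) := by rw [hstep]
      _ = (L2.foldl pvMStep (G1.insert p.1 w0)).insert p.1 (w0.add p.2) := by
          rw [pv_foldl_mstep_insert L2 _ _ _ hcont hL2]
      _ = pvAddTo ((L1 ++ (p.1, v0) :: L2).foldl pvMStep G) p := by
          rw [List.foldl_append, List.foldl_cons]
          have : pvMStep G1 (p.1, v0) = G1.insert p.1 w0 := rfl
          rw [this]
          unfold pvAddTo
          rw [pv_getD_foldl_mstep L2 _ _ hL2, PySem.Dict.getD_insert_self]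
    rw [hitems]
  · -- fresh key: appended at the end
    have hc' : J.contains p.1 = false := by simpa using hc
    have : (pvAddTo J p).items = J.items ++ [(p.1, PySem.Set.empty.add p.2)] := by
      unfold pvAddTo
      rw [PySem.Dict.getD_of_not_contains _ _ hc', PySem.Dict.items_insert_of_not_contains _ _ hc']
    rw [this, List.foldl_append, List.foldl_cons, List.foldl_nil]
    unfold pvMStep pvAddTo
    rw [pv_update_add]
    rfl

theorem pv_merge_foldl (ops : List (List Int × (Int × Int)))
    (J G : PySem.Dict (List Int) (PySem.Set (Int × Int))) (hJ : J.keys.Nodup) :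
    (ops.foldl pvAddTo J).items.foldl pvMStep G = ops.foldl pvAddTo (J.items.foldl pvMStep G) := by
  induction ops generalizing J G with
  | nil => rfl
  | cons p ops ih =>
    rw [List.foldl_cons, List.foldl_cons,
      ih (pvAddTo J p) G (PySem.Dict.nodup_keys_insert _ _ _ hJ), pv_merge_addTo J G hJ p]

set_option maxHeartbeats 1600000 in
theorem pv_joinA (x y : Int) (hxy : x ≠ y) (xs ys : List (Int × Int)) :
    pvTemporalJoin ([x], xs) ([y], ys) = (pvOpsKV x y xs ys).foldl pvAddTo PySem.Dict.empty := by
  unfold pvTemporalJoin pvOpsKV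
  rw [List.foldl_flatMap]
  simp only [List.foldl_map]
  apply PySem.List.foldl_congr_mem
  intro res ea _
  rw [show (fun (eb : Int × Int) => eb.1 == ea.1) = (fun eb => ea.1 == eb.1) from
        funext (fun eb => pv_beq_comm eb.1 ea.1),
      ← PySem.List.foldl_if_eq_foldl_filter]
  apply PySem.List.foldl_congr_mem
  intro res eb _
  have hx : PySem.List.pyGetD [x] (-1) 0 = x := by simp [pysem]
  have hy : PySem.List.pyGetD [y] (-1) 0 = y := by simp [pysem]
  have hsx : PySem.List.slice [x] none (some (-1)) = ([] : List Int) := by simp [pysem]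
  have hsy : PySem.List.slice [y] none (some (-1)) = ([] : List Int) := by simp [pysem]
  by_cases hg : (ea.1 == eb.1) = true
  · rw [if_pos hg, if_pos hg]
    simp only [hx, hy, hsx, hsy, pv_sorted_pair, List.nil_append,
      List.cons_append, pv_dict_step, gt_iff_lt]
    by_cases h1 : ea.2 < eb.2
    · rw [if_pos h1]
      simp only [pvAddTo, pvSel, if_pos h1]
    · rw [if_neg h1]
      by_cases h2 : eb.2 < ea.2
      · rw [if_pos h2]
        simp only [pvAddTo, pvSel, if_neg h1, if_pos h2]
      · rw [if_neg h2, if_pos hxy, if_neg (fun (h : [min x y, max x y] ≠ [min x y, max x y]) => h rfl)]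
        simp only [pvAddTo, pvSel, if_neg h1, if_neg h2]
  · rw [if_neg hg, if_neg hg]

theorem pv_joinB (x y : Int) (xs ys : List (Int × Int))
    (acc : PySem.Dict (List Int) (PySem.Set (Int × Int))) :
    xs.foldl (fun acc ev_a =>
      ((ys.foldl (fun (d : PySem.Dict Int (List (Int × Int))) eb =>
          d.insert eb.1 (d.getD eb.1 [] ++ [eb])) PySem.Dict.empty).getD ev_a.1 []).foldl (fun acc ev_b =>
        if ev_a.2 < ev_b.2 then acc.insert [x, y] ((acc.getD [x, y] PySem.Set.empty).add ev_b)
        else if ev_a.2 > ev_b.2 then acc.insert [y, x] ((acc.getD [y, x] PySem.Set.empty).add ev_a)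
        else acc.insert [min x y, max x y] ((acc.getD [min x y, max x y] PySem.Set.empty).add ev_b)) acc) acc
    = (pvOpsKV x y xs ys).foldl pvAddTo acc := by
  unfold pvOpsKV
  rw [List.foldl_flatMap]
  simp only [List.foldl_map]
  apply PySem.List.foldl_congr_mem
  intro acc ea _
  rw [pv_bucket_getD]
  apply PySem.List.foldl_congr_mem
  intro acc eb _
  by_cases h1 : ea.2 < eb.2
  · simp [pvAddTo, pvSel, h1]
  · by_cases h2 : eb.2 < ea.2
    · simp [pvAddTo, pvSel, h1, h2, gt_iff_lt]
    · simp [pvAddTo, pvSel, h1, h2, gt_iff_lt]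

theorem pv_final (d : PySem.Dict (List Int) (PySem.Set (Int × Int))) (thr : Int) :
    (pvFreqEleExtract d thr).items
      = (d.items.foldl (fun out kv =>
          if thr ≤ ((PySem.Set.ofList (kv.2.map (fun v => v.1))).length : Int)
          then out.insert kv.1 kv.2 else out) PySem.Dict.empty).items := by
  unfold pvFreqEleExtract
  congr 1
  apply PySem.List.foldl_congr_mem
  intro acc kv _
  simp only [pv_set_fold_fst]

-- ===== VERDICT (by name: the statement is the Claim_ definition above) =====
theorem Frequent2ElementSequenceExtractor_spec : Claim_equal_Frequent2ElementSequenceExtractor := by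
  intro freqEleList sup_threshold _
  unfold Spec_Frequent2ElementSequenceExtractor
  unfold Frequent2ElementSequenceExtractor Frequent2ElementSequenceExtractor_alt
  simp only [pv_dict_step, PySem.Dict.values, List.foldl_map]
  rw [pv_final]
  congr 1
  congr 1
  congr 1
  apply PySem.List.foldl_congr_mem
  intro acc tc _
  by_cases h1 : tc.2 < sup_threshold
  · have hg2 : (decide (tc.2 < sup_threshold) || tc.1.1 == tc.1.2) = true := by simp [h1]
    rw [if_pos h1, if_pos hg2]
  · cases h2 : tc.1.1 == tc.1.2 with
    | true =>
      rw [if_neg h1, if_pos rfl, if_pos (by simp)]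
    | false =>
      have hxy : tc.1.1 ≠ tc.1.2 := by simpa using h2
      have hg1 : ¬ (false = true) := by simp
      have hg2 : ¬ ((decide (tc.2 < sup_threshold) || false) = true) := by simp [h1]
      rw [if_neg h1, if_neg hg1, if_neg hg2,
        show (fun (acc : PySem.Dict (List Int) (PySem.Set (Int × Int)))
              (si : List Int × PySem.Set (Int × Int)) =>
            acc.insert si.1 ((acc.getD si.1 PySem.Set.empty).update si.2)) = pvMStep from rfl,
        pv_joinA _ _ hxy, pv_merge_foldl _ _ _ PySem.Dict.nodup_keys_empty, pv_joinB]
      rfl
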